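-- pv_equiv track=rewrite | github.com/hall-jm/theseus | src/adr_linter/constants/sections.py | get_expected_header_text
-- ===== SOURCE A (Python) =====
-- HEADING_ALIASES = {
--     # Universal sections
--     "Decision (one-liner)": "decision_one_liner",
--     "Decision (One-liner)": "decision_one_liner",
--     "Context & Drivers": "context_and_drivers",
--     "Context and Drivers": "context_and_drivers",
--     "Options Considered": "options_considered",
--     "Decision Details": "decision_details",
--     "Evidence & Links": "evidence_and_links",
--     "Evidence and Links": "evidence_and_links",
--     "Glossary": "glossary",
--     "Related ADRs": "related_adrs",
--     "License": "license",
--     # Owner/Delta sections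
--     "Consequences & Risks": "consequences_and_risks",
--     "Consequences and Risks": "consequences_and_risks",
--     "Implementation Notes": "implementation_notes",
--     "Rollout & Backout": "rollout_backout",
--     "Rollout and Backout": "rollout_backout",
--     # Strategy sections
--     "Principles": "principles",
--     "Guardrails": "guardrails",
--     "North Star Metrics": "north_star_metrics",
--     "North-Star Metrics": "north_star_metrics",
--     # Governance sections
--     "Authority Scope": "authority_scope",
--     "Constraint Rules": "constraint_rules",
--     "Precedence Mappings": "precedence_mappings",
--     "Adoption & Enforcement": "adoption_and_enforcement",
--     "Adoption and Enforcement": "adoption_and_enforcement",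
-- }
--
-- def get_expected_header_text(section_key: str) -> str:
--     """
--     Get all acceptable markdown header texts for a section key.
--     """
--     acceptable_headers = []
--
--     # Find all heading aliases that map to this section key
--     for heading_text, key in HEADING_ALIASES.items():
--         if key == section_key:
--             acceptable_headers.append(heading_text)
--
--     # If no aliases found, use fallback
--     if not acceptable_headers:
--         acceptable_headers.append(section_key.replace("_", " ").title())
--
--     return acceptable_headers
-- ===== SOURCE B (Python) =====
-- # Hand-precomputed reverse table: section key -> tuple of acceptable headings
-- # (in HEADING_ALIASES insertion order). One lookup per call, no scan.
-- _SECTION_HEADINGS = {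
--     "decision_one_liner": ("Decision (one-liner)", "Decision (One-liner)"),
--     "context_and_drivers": ("Context & Drivers", "Context and Drivers"),
--     "options_considered": ("Options Considered",),
--     "decision_details": ("Decision Details",),
--     "evidence_and_links": ("Evidence & Links", "Evidence and Links"),
--     "glossary": ("Glossary",),
--     "related_adrs": ("Related ADRs",),
--     "license": ("License",),
--     "consequences_and_risks": ("Consequences & Risks", "Consequences and Risks"),
--     "implementation_notes": ("Implementation Notes",),
--     "rollout_backout": ("Rollout & Backout", "Rollout and Backout"),
--     "principles": ("Principles",),
--     "guardrails": ("Guardrails",),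
--     "north_star_metrics": ("North Star Metrics", "North-Star Metrics"),
--     "authority_scope": ("Authority Scope",),
--     "constraint_rules": ("Constraint Rules",),
--     "precedence_mappings": ("Precedence Mappings",),
--     "adoption_and_enforcement": ("Adoption & Enforcement", "Adoption and Enforcement"),
-- }
--
--
-- def get_expected_header_text(section_key: str) -> str:
--     aliases = _SECTION_HEADINGS.get(section_key)
--     if aliases is not None:
--         return list(aliases)
--     return [section_key.replace("_", " ").title()]
-- ===== Notes on version B (the rewrite author's own statement) =====
-- stated objective: simpler
-- what changed: Replaces A's per-call filtering scan over the 25-entry HEADING_ALIASES dict with a hand-precomputed reverse table (section key -> tuple of headings) consulted by a single dict lookup; the proof certifies the hand-built table matches A's scan.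
import Mathlib
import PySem

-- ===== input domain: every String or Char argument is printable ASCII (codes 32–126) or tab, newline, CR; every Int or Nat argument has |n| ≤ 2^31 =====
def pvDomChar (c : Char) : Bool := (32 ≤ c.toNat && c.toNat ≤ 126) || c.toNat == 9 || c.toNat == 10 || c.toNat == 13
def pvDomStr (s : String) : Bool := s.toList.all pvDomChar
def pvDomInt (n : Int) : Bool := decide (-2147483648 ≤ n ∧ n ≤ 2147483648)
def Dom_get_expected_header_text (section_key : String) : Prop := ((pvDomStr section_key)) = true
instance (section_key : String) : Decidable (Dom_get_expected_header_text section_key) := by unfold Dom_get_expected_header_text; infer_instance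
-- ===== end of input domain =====

-- B replaces A's per-call filtering scan over HEADING_ALIASES with a hand-precomputed
-- reverse table consulted by a single lookup (simpler per-call logic; the proof below
-- certifies the hand-built table agrees with A's scan).

-- Port of Python str.title(); exact on the printable-ASCII domain (only A–Z/a–z are cased there).
def pyTitleAux : Bool → List Char → List Char
  | _, [] => []
  | prev, c :: rest =>
    (if c.isAlpha then (if prev then c.toLower else c.toUpper) else c) :: pyTitleAux c.isAlpha rest

def pyTitle (s : String) : String := String.ofList (pyTitleAux false s.toList)

-- ===== PORT A =====
-- HEADING_ALIASES as an insertion-ordered association list (A's module constant).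
def HEADING_ALIASES : List (String × String) :=
  [("Decision (one-liner)", "decision_one_liner"),
   ("Decision (One-liner)", "decision_one_liner"),
   ("Context & Drivers", "context_and_drivers"),
   ("Context and Drivers", "context_and_drivers"),
   ("Options Considered", "options_considered"),
   ("Decision Details", "decision_details"),
   ("Evidence & Links", "evidence_and_links"),
   ("Evidence and Links", "evidence_and_links"),
   ("Glossary", "glossary"),
   ("Related ADRs", "related_adrs"),
   ("License", "license"),
   ("Consequences & Risks", "consequences_and_risks"),
   ("Consequences and Risks", "consequences_and_risks"),
   ("Implementation Notes", "implementation_notes"),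
   ("Rollout & Backout", "rollout_backout"),
   ("Rollout and Backout", "rollout_backout"),
   ("Principles", "principles"),
   ("Guardrails", "guardrails"),
   ("North Star Metrics", "north_star_metrics"),
   ("North-Star Metrics", "north_star_metrics"),
   ("Authority Scope", "authority_scope"),
   ("Constraint Rules", "constraint_rules"),
   ("Precedence Mappings", "precedence_mappings"),
   ("Adoption & Enforcement", "adoption_and_enforcement"),
   ("Adoption and Enforcement", "adoption_and_enforcement")]

def get_expected_header_text (section_key : String) : List String :=
  let acceptable_headers : List String :=
    HEADING_ALIASES.foldl (fun acc p => if p.2 == section_key then acc ++ [p.1] else acc) []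
  if acceptable_headers.isEmpty then
    [pyTitle (PySem.Str.replace section_key "_" " ")]
  else acceptable_headers

-- ===== PORT B =====
-- B's module constant _SECTION_HEADINGS: a hand-written reverse table (key -> headings).
def pvSectionHeadings : PySem.Dict String (List String) := PySem.Dict.mk
  [("decision_one_liner", ["Decision (one-liner)", "Decision (One-liner)"]),
   ("context_and_drivers", ["Context & Drivers", "Context and Drivers"]),
   ("options_considered", ["Options Considered"]),
   ("decision_details", ["Decision Details"]),
   ("evidence_and_links", ["Evidence & Links", "Evidence and Links"]),
   ("glossary", ["Glossary"]),
   ("related_adrs", ["Related ADRs"]),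
   ("license", ["License"]),
   ("consequences_and_risks", ["Consequences & Risks", "Consequences and Risks"]),
   ("implementation_notes", ["Implementation Notes"]),
   ("rollout_backout", ["Rollout & Backout", "Rollout and Backout"]),
   ("principles", ["Principles"]),
   ("guardrails", ["Guardrails"]),
   ("north_star_metrics", ["North Star Metrics", "North-Star Metrics"]),
   ("authority_scope", ["Authority Scope"]),
   ("constraint_rules", ["Constraint Rules"]),
   ("precedence_mappings", ["Precedence Mappings"]),
   ("adoption_and_enforcement", ["Adoption & Enforcement", "Adoption and Enforcement"])]

def get_expected_header_text_alt (section_key : String) : List String :=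
  match pvSectionHeadings.get? section_key with
  | some aliases => aliases
  | none => [pyTitle (PySem.Str.replace section_key "_" " ")]

-- ===== PRECONDITION & SPEC =====
def Spec_get_expected_header_text (section_key : String) (out : List String) : Prop := out = get_expected_header_text_alt section_key
instance (section_key : String) (out : List String) : Decidable (Spec_get_expected_header_text section_key out) := by unfold Spec_get_expected_header_text; infer_instance

-- ===== CLAIM (what is proved, stated in full; the proofs are below) =====
def Claim_equal_get_expected_header_text : Prop := ∀ (section_key : String), Dom_get_expected_header_text section_key → Spec_get_expected_header_text section_key (get_expected_header_text section_key)

-- ===== LEMMAS AND PROOFS =====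

theorem pv_agree (section_key : String) :
    get_expected_header_text section_key = get_expected_header_text_alt section_key := by
  by_cases h0 : section_key = "decision_one_liner"
  · subst h0; decide
  by_cases h1 : section_key = "context_and_drivers"
  · subst h1; decide
  by_cases h2 : section_key = "options_considered"
  · subst h2; decide
  by_cases h3 : section_key = "decision_details"
  · subst h3; decide
  by_cases h4 : section_key = "evidence_and_links"
  · subst h4; decide
  by_cases h5 : section_key = "glossary"
  · subst h5; decide
  by_cases h6 : section_key = "related_adrs"
  · subst h6; decide
  by_cases h7 : section_key = "license"
  · subst h7; decide
  by_cases h8 : section_key = "consequences_and_risks"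
  · subst h8; decide
  by_cases h9 : section_key = "implementation_notes"
  · subst h9; decide
  by_cases h10 : section_key = "rollout_backout"
  · subst h10; decide
  by_cases h11 : section_key = "principles"
  · subst h11; decide
  by_cases h12 : section_key = "guardrails"
  · subst h12; decide
  by_cases h13 : section_key = "north_star_metrics"
  · subst h13; decide
  by_cases h14 : section_key = "authority_scope"
  · subst h14; decide
  by_cases h15 : section_key = "constraint_rules"
  · subst h15; decide
  by_cases h16 : section_key = "precedence_mappings"
  · subst h16; decide
  by_cases h17 : section_key = "adoption_and_enforcement"
  · subst h17; decide
  -- default: section_key maps to nothing; both sides take the fallback branch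
  have H0 : ¬ ("decision_one_liner" = section_key) := fun e => h0 e.symm
  have HB0 : ("decision_one_liner" == section_key) = false := beq_eq_false_iff_ne.mpr H0
  have H1 : ¬ ("context_and_drivers" = section_key) := fun e => h1 e.symm
  have HB1 : ("context_and_drivers" == section_key) = false := beq_eq_false_iff_ne.mpr H1
  have H2 : ¬ ("options_considered" = section_key) := fun e => h2 e.symm
  have HB2 : ("options_considered" == section_key) = false := beq_eq_false_iff_ne.mpr H2
  have H3 : ¬ ("decision_details" = section_key) := fun e => h3 e.symm
  have HB3 : ("decision_details" == section_key) = false := beq_eq_false_iff_ne.mpr H3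
  have H4 : ¬ ("evidence_and_links" = section_key) := fun e => h4 e.symm
  have HB4 : ("evidence_and_links" == section_key) = false := beq_eq_false_iff_ne.mpr H4
  have H5 : ¬ ("glossary" = section_key) := fun e => h5 e.symm
  have HB5 : ("glossary" == section_key) = false := beq_eq_false_iff_ne.mpr H5
  have H6 : ¬ ("related_adrs" = section_key) := fun e => h6 e.symm
  have HB6 : ("related_adrs" == section_key) = false := beq_eq_false_iff_ne.mpr H6
  have H7 : ¬ ("license" = section_key) := fun e => h7 e.symm
  have HB7 : ("license" == section_key) = false := beq_eq_false_iff_ne.mpr H7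
  have H8 : ¬ ("consequences_and_risks" = section_key) := fun e => h8 e.symm
  have HB8 : ("consequences_and_risks" == section_key) = false := beq_eq_false_iff_ne.mpr H8
  have H9 : ¬ ("implementation_notes" = section_key) := fun e => h9 e.symm
  have HB9 : ("implementation_notes" == section_key) = false := beq_eq_false_iff_ne.mpr H9
  have H10 : ¬ ("rollout_backout" = section_key) := fun e => h10 e.symm
  have HB10 : ("rollout_backout" == section_key) = false := beq_eq_false_iff_ne.mpr H10
  have H11 : ¬ ("principles" = section_key) := fun e => h11 e.symm
  have HB11 : ("principles" == section_key) = false := beq_eq_false_iff_ne.mpr H11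
  have H12 : ¬ ("guardrails" = section_key) := fun e => h12 e.symm
  have HB12 : ("guardrails" == section_key) = false := beq_eq_false_iff_ne.mpr H12
  have H13 : ¬ ("north_star_metrics" = section_key) := fun e => h13 e.symm
  have HB13 : ("north_star_metrics" == section_key) = false := beq_eq_false_iff_ne.mpr H13
  have H14 : ¬ ("authority_scope" = section_key) := fun e => h14 e.symm
  have HB14 : ("authority_scope" == section_key) = false := beq_eq_false_iff_ne.mpr H14
  have H15 : ¬ ("constraint_rules" = section_key) := fun e => h15 e.symm
  have HB15 : ("constraint_rules" == section_key) = false := beq_eq_false_iff_ne.mpr H15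
  have H16 : ¬ ("precedence_mappings" = section_key) := fun e => h16 e.symm
  have HB16 : ("precedence_mappings" == section_key) = false := beq_eq_false_iff_ne.mpr H16
  have H17 : ¬ ("adoption_and_enforcement" = section_key) := fun e => h17 e.symm
  have HB17 : ("adoption_and_enforcement" == section_key) = false := beq_eq_false_iff_ne.mpr H17
  simp [get_expected_header_text, get_expected_header_text_alt, HEADING_ALIASES,
    pvSectionHeadings, PySem.Dict.get?, List.find?, H0, HB0, H1, HB1, H2, HB2,
    H3, HB3, H4, HB4, H5, HB5, H6, HB6, H7, HB7, H8, HB8, H9, HB9, H10, HB10, H11, HB11,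
    H12, HB12, H13, HB13, H14, HB14, H15, HB15, H16, HB16, H17, HB17]

-- ===== VERDICT (by name: the statement is the Claim_ definition above) =====
theorem get_expected_header_text_spec : Claim_equal_get_expected_header_text := by
  intro section_key _
  unfold Spec_get_expected_header_text
  exact pv_agree section_key
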